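-- pv_equiv track=rewrite | github.com/vikkycoderr/EmailExtracterRecruiters | Email_Extractor.py | nameExtractor
-- ===== SOURCE A (Python) =====
-- def nameExtractor(title2):
--     firstName=""
--     lastName=""
--     counterDashDot=0
--     counterSpace=0
--     name=""
--     for i in title2:
--         if i=="-" or i=="." or i==",":
--             counterDashDot+=1
--         if i==" ":
--             counterSpace+=1
--         if counterDashDot==1 or counterSpace==2:
--             break
--         name+=i
--     index=0
--     for j in name:
--         if index==0:
--             if j != " ":
--                 firstName+=j
--         if index==1:
--             lastName+=j
--         if j==" ":
--             index+=1
--     return [firstName,lastName]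
-- ===== SOURCE B (Python) =====
-- def nameExtractor(title2):
--     # Cut at the first '-', '.' or ',' (partition keeps only the prefix),
--     # then firstName = before the first space, lastName = up to the next space.
--     head = title2
--     for d in "-.,":
--         head = head.partition(d)[0]
--     firstName, _, rest = head.partition(" ")
--     lastName = rest.partition(" ")[0]
--     return [firstName, lastName]
-- ===== Notes on version B (the rewrite author's own statement) =====
-- stated objective: simpler
-- what changed: Replaces A's two counter-driven character-by-character accumulation loops by three str.partition cuts (at the first delimiter, at the first space, and at the following space), which also avoids A's per-character string concatenation.
import Mathlib
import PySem

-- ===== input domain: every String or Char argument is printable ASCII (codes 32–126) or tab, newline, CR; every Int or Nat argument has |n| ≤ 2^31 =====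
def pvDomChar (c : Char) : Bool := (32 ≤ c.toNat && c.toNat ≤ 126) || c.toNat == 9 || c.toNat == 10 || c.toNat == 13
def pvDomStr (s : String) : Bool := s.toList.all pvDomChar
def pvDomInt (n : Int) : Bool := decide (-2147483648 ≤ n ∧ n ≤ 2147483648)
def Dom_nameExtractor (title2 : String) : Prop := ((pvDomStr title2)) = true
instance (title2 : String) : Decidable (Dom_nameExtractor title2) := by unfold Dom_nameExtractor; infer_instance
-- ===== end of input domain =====

-- B replaces A's two counter-driven character loops by three str.partition cuts: simpler, loop-free.

-- ===== PORT A =====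
-- first loop of A: scan title2, break at first '-'/'.'/',' or at the second space
def loopA1 : List Char → Int → Int → List Char → List Char
  | [], _, _, name => name
  | i :: rest, counterDashDot, counterSpace, name =>
    let counterDashDot := if i = '-' ∨ i = '.' ∨ i = ',' then counterDashDot + 1 else counterDashDot
    let counterSpace := if i = ' ' then counterSpace + 1 else counterSpace
    if counterDashDot = 1 ∨ counterSpace = 2 then name
    else loopA1 rest counterDashDot counterSpace (name ++ [i])

-- second loop of A: split name at its first space using the index state variable
def loopA2 : List Char → Int → List Char → List Char → List Char × List Char
  | [], _, firstName, lastName => (firstName, lastName)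
  | j :: rest, index, firstName, lastName =>
    let firstName := if index = 0 ∧ j ≠ ' ' then firstName ++ [j] else firstName
    let lastName := if index = 1 then lastName ++ [j] else lastName
    let index := if j = ' ' then index + 1 else index
    loopA2 rest index firstName lastName

def nameExtractor (title2 : String) : List String :=
  let name := loopA1 title2.toList 0 0 []
  let p := loopA2 name 0 [] []
  [String.mk p.1, String.mk p.2]

-- ===== PORT B =====
-- str.partition(d)[0] is ported exactly as takeWhile (· ≠ d);
-- partition(" ") as (takeWhile (· ≠ ' '), drop 1 ∘ dropWhile (· ≠ ' ')) — exact for one-char separators.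
def nameExtractor_alt (title2 : String) : List String :=
  let head := List.foldl (fun (h : List Char) (d : Char) => h.takeWhile (· ≠ d)) title2.toList ['-', '.', ',']
  let firstName := head.takeWhile (· ≠ ' ')
  let rest := (head.dropWhile (· ≠ ' ')).drop 1
  let lastName := rest.takeWhile (· ≠ ' ')
  [String.mk firstName, String.mk lastName]

-- ===== PRECONDITION & SPEC =====
def Spec_nameExtractor (title2 : String) (out : List String) : Prop := out = nameExtractor_alt title2
instance (title2 : String) (out : List String) : Decidable (Spec_nameExtractor title2 out) := by unfold Spec_nameExtractor; infer_instance

-- ===== CLAIM (what is proved, stated in full; the proofs are below) =====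
def Claim_equal_nameExtractor : Prop := ∀ (title2 : String), Dom_nameExtractor title2 → Spec_nameExtractor title2 (nameExtractor title2)

-- ===== LEMMAS AND PROOFS =====

-- characterisation of A's first loop: prefix up to the first delimiter or the second space
def take2 : List Char → Bool → List Char
  | [], _ => []
  | c :: r, seen =>
    if c = '-' ∨ c = '.' ∨ c = ',' then []
    else if c = ' ' then (if seen then [] else ' ' :: take2 r true)
    else c :: take2 r seen

theorem loopA1_eq (cs : List Char) : ∀ (s : Int) (acc : List Char), (s = 0 ∨ s = 1) →
    loopA1 cs 0 s acc = acc ++ take2 cs (s == 1) := by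
  induction cs with
  | nil => intro s acc _; simp [loopA1, take2]
  | cons c r ih =>
    intro s acc hs
    by_cases hd : c = '-' ∨ c = '.' ∨ c = ','
    · simp [loopA1, take2, hd]
    · by_cases hsp : c = ' '
      · subst hsp
        have e1 : ¬(' ' = '-' ∨ ' ' = '.' ∨ ' ' = ',') := by decide
        rcases hs with h0 | h1
        · subst h0
          simp only [loopA1, take2, e1, if_false, ite_false, if_true, ite_true]
          norm_num
          rw [ih 1 (acc ++ [' ']) (Or.inr rfl)]
          simp
        · subst h1
          simp only [loopA1, take2, e1, if_false, ite_false, if_true, ite_true]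
          norm_num
      · simp only [loopA2, loopA1, take2, hd, hsp, if_false, ite_false]
        rw [if_neg (show ¬((0:Int) = 1 ∨ s = 2) by rcases hs with h | h <;> subst h <;> norm_num),
            ih s (acc ++ [c]) hs]
        simp

theorem loopA2_one (name : List Char) : ∀ (fn ln : List Char), ' ' ∉ name →
    loopA2 name 1 fn ln = (fn, ln ++ name) := by
  induction name with
  | nil => intro fn ln _; simp [loopA2]
  | cons c r ih =>
    intro fn ln h
    have hc : c ≠ ' ' := fun e => h (e ▸ List.mem_cons_self ..)
    have hr : ' ' ∉ r := fun m => h (List.mem_cons_of_mem _ m)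
    simp only [loopA2]
    simp only [hc, if_false, ite_false]
    norm_num
    rw [ih fn (ln ++ [c]) hr]
    simp

theorem loopA2_zero (name : List Char) : ∀ (fn ln : List Char),
    ' ' ∉ ((name.dropWhile (· ≠ ' ')).drop 1) →
    loopA2 name 0 fn ln =
      (fn ++ name.takeWhile (· ≠ ' '), ln ++ (name.dropWhile (· ≠ ' ')).drop 1) := by
  induction name with
  | nil => intro fn ln _; simp [loopA2]
  | cons c r ih =>
    intro fn ln h
    by_cases hc : c = ' '
    · subst hc
      simp only [loopA2]
      norm_num
      have heq := loopA2_one r fn ln (by simpa using h)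
      rw [heq]
    · simp only [loopA2]
      simp only [hc]
      norm_num
      rw [if_neg hc]
      rw [ih (fn ++ [c]) ln (by simpa [List.dropWhile_cons, hc] using h)]
      simp [List.takeWhile_cons, List.dropWhile_cons, hc, List.drop_one]

-- take2 after a space contains no further space
theorem no_space_take2_true (cs : List Char) : ' ' ∉ take2 cs true := by
  induction cs with
  | nil => simp [take2]
  | cons c r ih =>
    by_cases hd : c = '-' ∨ c = '.' ∨ c = ','
    · simp [take2, hd]
    · by_cases hsp : c = ' '
      · simp [take2, hd, hsp]
      · simp only [take2, hd, hsp, if_false, ite_false]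
        intro hm
        rcases List.mem_cons.mp hm with h | h
        · exact hsp h.symm
        · exact ih h

theorem no_space_after (cs : List Char) : ' ' ∉ (((take2 cs false).dropWhile (· ≠ ' ')).drop 1) := by
  induction cs with
  | nil => simp [take2]
  | cons c r ih =>
    by_cases hd : c = '-' ∨ c = '.' ∨ c = ','
    · simp [take2, hd]
    · by_cases hsp : c = ' '
      · subst hsp
        simp only [take2, hd, if_false, ite_false, if_true, ite_true]
        simp only [List.dropWhile_cons, ne_eq, not_true, decide_false]
        simpa using no_space_take2_true r
      · simp only [take2, hd, hsp, if_false, ite_false]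
        simpa [List.dropWhile_cons, hsp] using ih

-- take2 only looks at the prefix before the first delimiter
theorem take2_takeWhile (p : Char → Bool)
    (hp : ∀ c, (c = '-' ∨ c = '.' ∨ c = ',') → p c = false)
    (hq : ∀ c, ¬(c = '-' ∨ c = '.' ∨ c = ',') → p c = true) :
    ∀ (cs : List Char) (s : Bool), take2 cs s = take2 (cs.takeWhile p) s := by
  intro cs
  induction cs with
  | nil => intro s; simp
  | cons c r ih =>
    intro s
    by_cases hd : c = '-' ∨ c = '.' ∨ c = ','
    · simp [take2, hd, List.takeWhile_cons, hp c hd]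
    · have hpc : p c = true := hq c hd
      by_cases hsp : c = ' '
      · subst hsp
        cases s <;> simp [take2, hpc, List.takeWhile_cons, ← ih]
      · simp [take2, hd, hsp, List.takeWhile_cons, hpc, ← ih]

-- delimiter-free lists: take2 with seen = true is takeWhile (· ≠ ' ')
theorem take2_true_eq (r : List Char) (hP : ∀ c ∈ r, ¬(c = '-' ∨ c = '.' ∨ c = ',')) :
    take2 r true = r.takeWhile (· ≠ ' ') := by
  induction r with
  | nil => simp [take2]
  | cons c t ih =>
    have hc := hP c (List.mem_cons_self ..)
    by_cases hsp : c = ' '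
    · simp [take2, hc, hsp]
    · simp [take2, hc, hsp, ih (fun x hx => hP x (List.mem_cons_of_mem _ hx))]

theorem take2_false_tw (h : List Char) (hP : ∀ c ∈ h, ¬(c = '-' ∨ c = '.' ∨ c = ',')) :
    (take2 h false).takeWhile (· ≠ ' ') = h.takeWhile (· ≠ ' ') := by
  induction h with
  | nil => simp [take2]
  | cons c t ih =>
    have hc := hP c (List.mem_cons_self ..)
    by_cases hsp : c = ' '
    · simp [take2, hc, hsp, List.takeWhile_cons]
    · have ih' := ih (fun x hx => hP x (List.mem_cons_of_mem _ hx))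
      simp only [take2, hc, hsp, if_false, ite_false]
      simp [List.takeWhile_cons, hsp]
      simpa using ih'

theorem take2_false_dw (h : List Char) (hP : ∀ c ∈ h, ¬(c = '-' ∨ c = '.' ∨ c = ',')) :
    ((take2 h false).dropWhile (· ≠ ' ')).drop 1 =
      ((h.dropWhile (· ≠ ' ')).drop 1).takeWhile (· ≠ ' ') := by
  induction h with
  | nil => simp [take2]
  | cons c t ih =>
    have hc := hP c (List.mem_cons_self ..)
    by_cases hsp : c = ' '
    · subst hsp
      simp only [take2, hc, if_false, ite_false, if_true, ite_true]
      simp [List.dropWhile_cons, take2_true_eq t (fun x hx => hP x (List.mem_cons_of_mem _ hx))]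
    · have ih' := ih (fun x hx => hP x (List.mem_cons_of_mem _ hx))
      simp only [take2, hc, hsp, if_false, ite_false]
      simp [List.dropWhile_cons, hsp]
      simpa [List.drop_one] using ih'

theorem tw_tw {α : Type} (p q : α → Bool) (xs : List α) :
    (xs.takeWhile p).takeWhile q = xs.takeWhile (fun x => p x && q x) := by
  induction xs with
  | nil => simp
  | cons c t ih =>
    by_cases hp : p c
    · by_cases hq : q c <;> simp [List.takeWhile_cons, hp, hq, ih]
    · simp [List.takeWhile_cons, hp]

-- ===== VERDICT (by name: the statement is the Claim_ definition above) =====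
theorem nameExtractor_spec : Claim_equal_nameExtractor := by
  unfold Claim_equal_nameExtractor
  intro title2 _
  have h1 : loopA1 title2.toList 0 0 [] = take2 title2.toList false := by
    simpa using loopA1_eq title2.toList 0 [] (Or.inl rfl)
  have h2 := loopA2_zero (take2 title2.toList false) [] [] (no_space_after title2.toList)
  simp only [List.nil_append] at h2
  have hp : ∀ c : Char, (c = '-' ∨ c = '.' ∨ c = ',') →
      ((decide (c ≠ '-') && decide (c ≠ '.')) && decide (c ≠ ',')) = false := by
    intro c hc
    rcases hc with h | h | h <;> subst h <;> decide
  have hq : ∀ c : Char, ¬(c = '-' ∨ c = '.' ∨ c = ',') →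
      ((decide (c ≠ '-') && decide (c ≠ '.')) && decide (c ≠ ',')) = true := by
    intro c hc
    push_neg at hc
    simp [hc.1, hc.2.1, hc.2.2]
  have ht2 := take2_takeWhile _ hp hq title2.toList false
  have hP : ∀ c ∈ title2.toList.takeWhile
      (fun x => (decide (x ≠ '-') && decide (x ≠ '.')) && decide (x ≠ ',')),
      ¬(c = '-' ∨ c = '.' ∨ c = ',') := by
    intro c hcmem hbad
    have hmem := List.mem_takeWhile_imp hcmem
    rw [hp c hbad] at hmem
    exact Bool.false_ne_true hmem
  have htw := take2_false_tw _ hP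
  have hdw := take2_false_dw _ hP
  show nameExtractor title2 = nameExtractor_alt title2
  simp only [nameExtractor, nameExtractor_alt, h1, h2]
  simp only [List.foldl_cons, List.foldl_nil, tw_tw]
  rw [ht2, htw, hdw, tw_tw]
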